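-- pv_equiv track=rewrite | github.com/datalab-org/datalab | pydatalab/src/pydatalab/utils/__init__.py | _find_common_suffix_smart
-- ===== SOURCE A (Python) =====
-- def _find_common_suffix_smart(strings: list[str]) -> str:
--     if not strings or len(strings) < 2:
--         return ""
--
--     suffix = _find_common_suffix(strings)
--
--     if not suffix:
--         return ""
--
--     if suffix.startswith("."):
--         return ""
--
--     if suffix[0] in ("-", "_", " ", "/", "\\"):
--         return suffix
--
--     first_sep = len(suffix)
--     for sep in ("-", "_", " ", "/", "\\"):
--         pos = suffix.find(sep)
--         if pos != -1 and pos < first_sep: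
--             first_sep = pos
--
--     if first_sep < len(suffix):
--         return suffix[first_sep:]
--
--     return ""
--
-- def _find_common_prefix(strings: list[str]) -> str:
--     if not strings or len(strings) < 2:
--         return ""
--
--     min_str = min(strings)
--     max_str = max(strings)
--
--     for i, char in enumerate(min_str):
--         if char != max_str[i]:
--             return min_str[:i]
--
--     return min_str
--
-- def _find_common_suffix(strings: list[str]) -> str:
--     if not strings or len(strings) < 2:
--         return ""
--
--     reversed_strings = [s[::-1] for s in strings]
--     common_reversed_prefix = _find_common_prefix(reversed_strings)
--
--     return common_reversed_prefix[::-1]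
-- ===== SOURCE B (Python) =====
-- def _common_prefix2(a: str, b: str) -> str:
--     out = []
--     for x, y in zip(a, b):
--         if x != y:
--             break
--         out.append(x)
--     return "".join(out)
--
--
-- def _find_common_suffix_smart(strings: list[str]) -> str:
--     if len(strings) < 2:
--         return ""
--
--     rev = strings[0][::-1]
--     for s in strings[1:]:
--         rev = _common_prefix2(rev, s[::-1])
--     suffix = rev[::-1]
--
--     if not suffix or suffix[0] == ".":
--         return ""
--
--     for i, ch in enumerate(suffix):
--         if ch in "-_ /\\":
--             return suffix[i:]
--     return ""
-- ===== Notes on version B (the rewrite author's own statement) =====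
-- stated objective: simpler
-- what changed: Replaces the reverse-all-strings + lexicographic-min/max + index-diff suffix computation by a single left fold of a pairwise common-prefix over the reversed strings, and replaces the five separate str.find scans plus running minimum by one enumerate scan that returns at the first separator character.
import Mathlib
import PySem

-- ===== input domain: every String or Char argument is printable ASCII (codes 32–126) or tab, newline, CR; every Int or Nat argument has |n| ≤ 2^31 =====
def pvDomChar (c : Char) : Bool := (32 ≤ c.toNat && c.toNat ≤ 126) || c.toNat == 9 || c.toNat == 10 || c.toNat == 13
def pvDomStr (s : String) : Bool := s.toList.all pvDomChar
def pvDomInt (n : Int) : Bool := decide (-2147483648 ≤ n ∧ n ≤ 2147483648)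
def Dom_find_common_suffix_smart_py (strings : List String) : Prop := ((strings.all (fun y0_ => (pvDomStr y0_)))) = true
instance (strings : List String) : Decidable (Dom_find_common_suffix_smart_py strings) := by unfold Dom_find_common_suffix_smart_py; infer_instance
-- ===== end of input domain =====

-- B replaces the reverse+lexicographic-min/max common-suffix computation by a left fold of a
-- pairwise common-prefix over the reversed strings, and the five str.find scans plus running
-- minimum by a single scan for the first separator character; same results, simpler structure.


-- ===== PORT A =====

-- s[::-1]  (step -1 never raises, so .getD "" is dead)
def pyRev (s : String) : String := (PySem.Str.slice? s none none (-1)).getD ""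

-- the 'for i, char in enumerate(min_str): if char != max_str[i]: return min_str[:i]' loop;
-- the 'none' branch is Python's IndexError, unreachable from the call site (min ≤ max)
def fcpGo (minL maxL : List Char) (i : Nat) : List Char :=
  if h : i < minL.length then
    match maxL[i]? with
    | some c => if minL[i] ≠ c then minL.take i else fcpGo minL maxL (i + 1)
    | none => minL.take i
  else minL
termination_by minL.length - i

def find_common_prefix_py (strings : List String) : String :=
  if strings.length < 2 then "" else
    match PySem.List.min? strings (fun s => s), PySem.List.max? strings (fun s => s) with
    | some mn, some mx => String.ofList (fcpGo mn.toList mx.toList 0)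
    | _, _ => ""   -- unreachable: strings is nonempty here

def find_common_suffix_py (strings : List String) : String :=
  if strings.length < 2 then "" else
    pyRev (find_common_prefix_py (strings.map pyRev))

def pySeps : List String := ["-", "_", " ", "/", "\\"]

def find_common_suffix_smart_py (strings : List String) : String :=
  if strings.length < 2 then "" else
  let suffix := find_common_suffix_py strings
  if PySem.Str.len suffix = 0 then "" else
  if PySem.Str.startswith suffix "." then "" else
  match PySem.Str.pyGet? suffix 0 with
  | none => ""   -- unreachable: suffix is nonempty here
  | some c =>
    if c ∈ ['-', '_', ' ', '/', '\\'] then suffix else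
    let first_sep : Int := pySeps.foldl (fun fs sep =>
      let pos := PySem.Str.find suffix sep
      if pos ≠ -1 ∧ pos < fs then pos else fs) (PySem.Str.len suffix)
    if first_sep < PySem.Str.len suffix then PySem.Str.slice suffix (some first_sep) none else ""

-- ===== PORT B =====

-- _common_prefix2: 'for x, y in zip(a, b): if x != y: break; out.append(x)'
def cp2go : List (Char × Char) → List Char
  | [] => []
  | (x, y) :: rest => if x ≠ y then [] else x :: cp2go rest

def sepChars : List Char := ['-', '_', ' ', '/', '\\']

-- 'for i, ch in enumerate(suffix): if ch in "-_ /\\": return suffix[i:]' ; falls off → ""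
def bScan : List Char → List Char
  | [] => []
  | c :: cs => if c ∈ sepChars then c :: cs else bScan cs

def find_common_suffix_smart_py_alt (strings : List String) : String :=
  match strings with
  | [] => ""
  | [_] => ""
  | s0 :: s1 :: rest =>
    let rev := (s1 :: rest).foldl (fun acc s => cp2go (acc.zip s.toList.reverse)) s0.toList.reverse
    let suffix := rev.reverse
    match suffix with
    | [] => ""
    | c :: _ => if c = '.' then "" else String.ofList (bScan suffix)

-- ===== PRECONDITION & SPEC =====
def Spec_find_common_suffix_smart_py (strings : List String) (out : String) : Prop := out = find_common_suffix_smart_py_alt strings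
instance (strings : List String) (out : String) : Decidable (Spec_find_common_suffix_smart_py strings out) := by unfold Spec_find_common_suffix_smart_py; infer_instance

-- ===== CLAIM (what is proved, stated in full; the proofs are below) =====
def Claim_equal_find_common_suffix_smart_py : Prop := ∀ (strings : List String), Dom_find_common_suffix_smart_py strings → Spec_find_common_suffix_smart_py strings (find_common_suffix_smart_py strings)

-- ===== LEMMAS AND PROOFS =====

-- proof-side abbreviation: B's pairwise common prefix on lists
def cp2 (a b : List Char) : List Char := cp2go (a.zip b)

theorem cp2_prefix_left (a : List Char) : ∀ b, cp2 a b <+: a := by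
  induction a with
  | nil => intro b; simp [cp2, cp2go]
  | cons x a' ih =>
    intro b
    cases b with
    | nil => simp [cp2, cp2go]
    | cons y b' =>
      simp only [cp2, List.zip_cons_cons, cp2go]
      split
      · exact List.nil_prefix
      · exact (List.cons_prefix_cons).mpr ⟨rfl, ih b'⟩

theorem cp2_prefix_right (a : List Char) : ∀ b, cp2 a b <+: b := by
  induction a with
  | nil => intro b; simp [cp2, cp2go]
  | cons x a' ih =>
    intro b
    cases b with
    | nil => simp [cp2, cp2go]
    | cons y b' =>
      simp only [cp2, List.zip_cons_cons, cp2go]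
      split
      · exact List.nil_prefix
      · next h =>
        simp only [ne_eq, not_not] at h
        subst h
        exact (List.cons_prefix_cons).mpr ⟨rfl, ih b'⟩

theorem cp2_greatest (p : List Char) : ∀ a b, p <+: a → p <+: b → p <+: cp2 a b := by
  induction p with
  | nil => intro a b _ _; exact List.nil_prefix
  | cons z p' ih =>
    intro a b ha hb
    cases a with
    | nil => exact absurd ha (by simp)
    | cons x a' =>
      cases b with
      | nil => exact absurd hb (by simp)
      | cons y b' =>
        rw [List.cons_prefix_cons] at ha hb
        obtain ⟨rfl, ha'⟩ := ha
        obtain ⟨rfl, hb'⟩ := hb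
        simp only [cp2, List.zip_cons_cons, cp2go, ne_eq, not_true_eq_false, if_false]
        exact (List.cons_prefix_cons).mpr ⟨rfl, ih a' b' ha' hb'⟩

-- lexicographic betweenness: if a ≤ b and b ≤ c then the common prefix of a and c is a prefix of b
theorem cp2_between (a : List Char) : ∀ b c : List Char,
    ¬ List.Lex (· < ·) b a → ¬ List.Lex (· < ·) c b → cp2 a c <+: b := by
  induction a with
  | nil => intro b c _ _; simp [cp2, cp2go]
  | cons x a' ih =>
    intro b c h1 h2
    cases c with
    | nil => simp [cp2, cp2go]
    | cons z c' =>
      simp only [cp2, List.zip_cons_cons, cp2go]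
      split
      · exact List.nil_prefix
      · next hxz =>
        simp only [ne_eq, not_not] at hxz
        subst hxz
        cases b with
        | nil => exact absurd List.Lex.nil h1
        | cons y b' =>
          have hyx : ¬ (y < x) := fun h => h1 (List.Lex.rel h)
          have hxy : ¬ (x < y) := fun h => h2 (List.Lex.rel h)
          have hxy' : x = y := le_antisymm (not_lt.mp hyx) (not_lt.mp hxy)
          subst hxy'
          have h1' : ¬ List.Lex (· < ·) b' a' := fun h => h1 (List.Lex.cons h)
          have h2' : ¬ List.Lex (· < ·) c' b' := fun h => h2 (List.Lex.cons h)
          exact (List.cons_prefix_cons).mpr ⟨rfl, ih b' c' h1' h2'⟩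

-- A's enumerate loop computes cp2 of the remainders
theorem fcpGo_eq (x y : List Char) (i : Nat) :
    fcpGo x y i = x.take i ++ cp2 (x.drop i) (y.drop i) := by
  unfold fcpGo
  split
  · next hi =>
    have hdx : x.drop i = x[i] :: x.drop (i + 1) := List.drop_eq_getElem_cons hi
    generalize hy : y[i]? = oc
    cases oc with
    | none =>
      have hyl : y.length ≤ i := List.getElem?_eq_none_iff.mp hy
      have hdy : y.drop i = [] := List.drop_eq_nil_of_le hyl
      show List.take i x = List.take i x ++ cp2 (List.drop i x) (List.drop i y)
      rw [hdy]
      simp [cp2, List.zip_nil_right, cp2go]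
    | some c =>
      have hiy : i < y.length := by
        by_contra h
        simp [List.getElem?_eq_none_iff.mpr (by omega : y.length ≤ i)] at hy
      have hc : y[i] = c :=
        Option.some_inj.mp ((List.getElem?_eq_getElem hiy).symm.trans hy)
      have hdy : y.drop i = c :: y.drop (i + 1) := by
        rw [List.drop_eq_getElem_cons hiy, hc]
      show (if x[i] ≠ c then List.take i x else fcpGo x y (i + 1)) =
        List.take i x ++ cp2 (List.drop i x) (List.drop i y)
      split
      · next hne =>
        rw [hdx, hdy]
        simp only [cp2, List.zip_cons_cons, cp2go]
        rw [if_pos hne, List.append_nil]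
      · next heq =>
        simp only [not_not] at heq
        rw [fcpGo_eq x y (i + 1), hdx, hdy]
        simp only [cp2, List.zip_cons_cons, cp2go]
        rw [if_neg (fun hcon => hcon heq)]
        have htake : List.take i x ++ [x[i]] = List.take (i + 1) x := by
          rw [List.take_add_one, List.getElem?_eq_getElem hi]
          rfl
        rw [← htake, List.append_assoc, List.singleton_append]
  · next hi =>
    have hxl : x.length ≤ i := by omega
    simp [List.take_of_length_le hxl, List.drop_eq_nil_of_le hxl, cp2, cp2go]
termination_by x.length - i

-- B's fold: the result is a prefix of the accumulator and of every folded string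
theorem fold_prefix (rest : List String) : ∀ acc : List Char,
    (rest.foldl (fun acc s => cp2go (acc.zip s.toList.reverse)) acc <+: acc) ∧
    (∀ s ∈ rest, rest.foldl (fun acc s => cp2go (acc.zip s.toList.reverse)) acc <+: s.toList.reverse) := by
  induction rest with
  | nil => intro acc; exact ⟨List.prefix_refl acc, by simp⟩
  | cons t rest' ih =>
    intro acc
    simp only [List.foldl_cons]
    refine ⟨(ih _).1.trans (cp2_prefix_left acc t.toList.reverse), ?_⟩
    intro s hs
    rcases List.mem_cons.mp hs with rfl | hs'
    · exact (ih _).1.trans (cp2_prefix_right acc s.toList.reverse)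
    · exact (ih _).2 s hs'

theorem fold_greatest (rest : List String) : ∀ acc p : List Char, p <+: acc →
    (∀ s ∈ rest, p <+: s.toList.reverse) →
    p <+: rest.foldl (fun acc s => cp2go (acc.zip s.toList.reverse)) acc := by
  induction rest with
  | nil => intro acc p hp _; simpa using hp
  | cons t rest' ih =>
    intro acc p hp hall
    simp only [List.foldl_cons]
    exact ih _ p (cp2_greatest p acc t.toList.reverse hp (hall t (by simp)))
      (fun s hs => hall s (List.mem_cons_of_mem _ hs))

theorem prefix_antisymm {a b : List Char} (h1 : a <+: b) (h2 : b <+: a) : a = b :=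
  h1.eq_of_length (Nat.le_antisymm h1.length_le h2.length_le)

theorem toList_pyRev (s : String) : (pyRev s).toList = s.toList.reverse := by
  simp [pyRev, PySem.Str.slice?_none_none_neg_one]

-- String order transfers to Lex on the character lists
theorem le_toList_notLex {s t : String} (h : s ≤ t) :
    ¬ List.Lex (· < ·) t.toList s.toList := by
  intro hlex
  have hlt : t < s := by
    rw [String.lt_iff_toList_lt]
    exact (List.lt_iff_lex_lt _ _).mpr hlex
  exact absurd hlt (not_lt.mpr h)

-- the key identity: A's suffix characters = B's fold of cp2 over the reversed strings
theorem suffix_chars_eq (s0 s1 : String) (rest : List String) :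
    (find_common_suffix_py (s0 :: s1 :: rest)).toList =
    ((s1 :: rest).foldl (fun acc s => cp2go (acc.zip s.toList.reverse)) s0.toList.reverse).reverse := by
  have hlen : ¬ (s0 :: s1 :: rest).length < 2 := by simp
  set strings := s0 :: s1 :: rest with hstr
  set rs := strings.map pyRev with hrs
  have hrs_len : ¬ rs.length < 2 := by simp [hrs, hstr]
  obtain ⟨mn, hmn⟩ : ∃ mn, PySem.List.min? rs (fun s => s) = some mn := by
    cases h : PySem.List.min? rs (fun s => s) with
    | none => exact absurd ((PySem.List.min?_eq_none_iff _ _).mp h) (by simp [hrs, hstr])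
    | some m => exact ⟨m, rfl⟩
  obtain ⟨mx, hmx⟩ : ∃ mx, PySem.List.max? rs (fun s => s) = some mx := by
    cases h : PySem.List.max? rs (fun s => s) with
    | none => exact absurd ((PySem.List.max?_eq_none_iff _ _).mp h) (by simp [hrs, hstr])
    | some m => exact ⟨m, rfl⟩
  have hA : (find_common_suffix_py strings).toList =
      (fcpGo mn.toList mx.toList 0).reverse := by
    rw [find_common_suffix_py, if_neg hlen, toList_pyRev, find_common_prefix_py,
      if_neg hrs_len, hmn, hmx]
    simp
  rw [hA, fcpGo_eq]
  simp only [List.take_zero, List.drop_zero, List.nil_append]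
  set G := (s1 :: rest).foldl (fun acc s => cp2go (acc.zip s.toList.reverse)) s0.toList.reverse
    with hG
  have hGpre : ∀ t ∈ rs, G <+: t.toList := by
    intro t ht
    obtain ⟨s, hs, rfl⟩ := List.mem_map.mp ht
    rw [toList_pyRev]
    rcases List.mem_cons.mp hs with rfl | hs'
    · exact (fold_prefix (s1 :: rest) s.toList.reverse).1
    · exact (fold_prefix (s1 :: rest) s0.toList.reverse).2 s hs'
  have h1 : G <+: cp2 mn.toList mx.toList :=
    cp2_greatest G mn.toList mx.toList (hGpre mn (PySem.List.min?_mem hmn))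
      (hGpre mx (PySem.List.max?_mem hmx))
  have h2 : cp2 mn.toList mx.toList <+: G := by
    apply fold_greatest
    · have := cp2_between mn.toList (pyRev s0).toList mx.toList
        (le_toList_notLex (PySem.List.min?_isMin hmn (pyRev s0) (by simp [hrs, hstr])))
        (le_toList_notLex (PySem.List.max?_isMax hmx (pyRev s0) (by simp [hrs, hstr])))
      rwa [toList_pyRev] at this
    · intro s hs
      have hmem : pyRev s ∈ rs := List.mem_map_of_mem (l := strings)
        (List.mem_cons_of_mem _ hs)
      have := cp2_between mn.toList (pyRev s).toList mx.toList
        (le_toList_notLex (PySem.List.min?_isMin hmn (pyRev s) hmem))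
        (le_toList_notLex (PySem.List.max?_isMax hmx (pyRev s) hmem))
      rwa [toList_pyRev] at this
  rw [prefix_antisymm h2 h1]

theorem findIdx_or_min (L : List Char) (q r : Char → Bool) :
    L.findIdx (fun x => q x || r x) = min (L.findIdx q) (L.findIdx r) := by
  induction L with
  | nil => simp
  | cons x t ih =>
    rw [List.findIdx_cons, List.findIdx_cons, List.findIdx_cons]
    cases hq : q x <;> cases hr : r x <;>
      simp only [Bool.or_true, Bool.or_false, cond_true, cond_false, ih] <;> omega

theorem findIdx_false (L : List Char) : L.findIdx (fun _ => false) = L.length := by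
  induction L with
  | nil => simp
  | cons x t ih => simp [List.findIdx_cons, ih]

-- the find.go loop for a single-character needle, with its position accumulator
theorem find_go_singleton (c : Char) (L : List Char) : ∀ k : Nat,
    PySem.Chars.find.go [c] L k =
      if L.findIdx (· = c) < L.length then ((k + L.findIdx (· = c) : Nat) : Int) else -1 := by
  induction L with
  | nil => intro k; simp [PySem.Chars.find.go]
  | cons x t ih =>
    intro k
    rw [PySem.Chars.find.go]
    by_cases hx : x = c
    · subst hx
      rw [if_pos (by simp [List.isPrefixOf])]
      have h0 : List.findIdx (· = x) (x :: t) = 0 := by simp [List.findIdx_cons]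
      rw [h0]
      simp
    · have hpre : List.isPrefixOf [c] (x :: t) = false := by
        simp [List.isPrefixOf]
        exact fun h => absurd h.symm hx
      rw [if_neg (by simp [hpre])]
      rw [ih (k + 1)]
      have hfx : (fun y => decide (y = c)) x = false := by simp [hx]
      simp only [List.findIdx_cons, hfx, cond_false, List.length_cons]
      split
      · next h =>
        rw [if_pos (by omega)]
        push_cast
        ring
      · next h =>
        rw [if_neg (by omega)]

theorem find_singleton (L : List Char) (c : Char) :
    PySem.Chars.find L [c] =
      if L.findIdx (· = c) < L.length then ((L.findIdx (· = c) : Nat) : Int) else -1 := by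
  have := find_go_singleton c L 0
  simpa [PySem.Chars.find] using this

-- one step of A's first_sep fold, fused into the combined findIdx
theorem sepStep (L : List Char) (c : Char) (q : Char → Bool) :
    (if PySem.Chars.find L [c] ≠ -1 ∧ PySem.Chars.find L [c] < ((L.findIdx q : Nat) : Int)
     then PySem.Chars.find L [c] else ((L.findIdx q : Nat) : Int))
    = ((L.findIdx (fun x => q x || x = c) : Nat) : Int) := by
  rw [find_singleton, findIdx_or_min]
  have hq : L.findIdx q ≤ L.length := List.findIdx_le_length
  have hc : L.findIdx (· = c) ≤ L.length := List.findIdx_le_length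
  by_cases hlt : L.findIdx (· = c) < L.length
  · rw [if_pos hlt]
    by_cases h2 : L.findIdx (· = c) < L.findIdx q
    · rw [if_pos ⟨by omega, by exact_mod_cast h2⟩]
      omega
    · rw [if_neg (by intro hcon; have := hcon.2; omega)]
      omega
  · rw [if_neg hlt]
    rw [if_neg (by simp)]
    omega

-- A's fold over the five separators finds the first separator position (or the length)
theorem firstSep_foldl (s : String) :
    pySeps.foldl (fun fs sep =>
        let pos := PySem.Str.find s sep
        if pos ≠ -1 ∧ pos < fs then pos else fs) (PySem.Str.len s)
    = ((s.toList.findIdx (· ∈ sepChars) : Nat) : Int) := by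
  have h0 : PySem.Str.len s = ((s.toList.findIdx (fun _ => false) : Nat) : Int) := by
    rw [findIdx_false, PySem.Str.len_eq]
  simp only [pySeps, List.foldl_cons, List.foldl_nil, PySem.Str.find_eq, h0]
  rw [show ("-" : String).toList = ['-'] from rfl, show ("_" : String).toList = ['_'] from rfl,
    show (" " : String).toList = [' '] from rfl, show ("/" : String).toList = ['/'] from rfl,
    show ("\\" : String).toList = ['\\'] from rfl]
  rw [sepStep, sepStep, sepStep, sepStep, sepStep]
  congr 2
  funext x
  simp [sepChars, Bool.or_assoc]

-- B's scan drops everything before the first separator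
theorem bScan_eq_drop (L : List Char) : bScan L = L.drop (L.findIdx (· ∈ sepChars)) := by
  induction L with
  | nil => simp [bScan]
  | cons x t ih =>
    rw [bScan]
    by_cases hx : x ∈ sepChars
    · simp [hx, List.findIdx_cons]
    · simp [hx, List.findIdx_cons, ih]

-- the post-processing halves agree on a suffix with head c ≠ '.'
theorem post_eq (c : Char) (cs : List Char) (suffix : String)
    (hsfx : suffix.toList = c :: cs) :
    (if c ∈ ['-', '_', ' ', '/', '\\'] then suffix else
      if (pySeps.foldl (fun fs sep =>
            let pos := PySem.Str.find suffix sep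
            if pos ≠ -1 ∧ pos < fs then pos else fs) (PySem.Str.len suffix))
          < PySem.Str.len suffix
      then PySem.Str.slice suffix (some (pySeps.foldl (fun fs sep =>
            let pos := PySem.Str.find suffix sep
            if pos ≠ -1 ∧ pos < fs then pos else fs) (PySem.Str.len suffix))) none
      else "")
    = String.ofList (bScan (c :: cs)) := by
  rw [firstSep_foldl]
  by_cases hc : c ∈ ['-', '_', ' ', '/', '\\']
  · rw [if_pos hc]
    have hidx : (c :: cs).findIdx (· ∈ sepChars) = 0 := by
      rw [List.findIdx_cons]
      simp [show (c ∈ sepChars) from hc]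
    rw [bScan_eq_drop, hidx, List.drop_zero, ← hsfx, String.ofList_toList]
  · rw [if_neg hc]
    rw [bScan_eq_drop, ← hsfx, PySem.Str.len_eq]
    by_cases hlt : suffix.toList.findIdx (· ∈ sepChars) < suffix.toList.length
    · rw [if_pos (by exact_mod_cast hlt)]
      rw [← String.toList_inj, String.toList_ofList]
      simp only [PySem.Str.slice]
      rw [String.toList_ofList]
      rw [show PySem.Chars.slice suffix.toList (some ((suffix.toList.findIdx (· ∈ sepChars) : Nat) : Int)) none
            = suffix.toList.drop (suffix.toList.findIdx (· ∈ sepChars))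
          from PySem.List.slice_from_natCast _ _]
    · rw [if_neg (by exact_mod_cast hlt)]
      have : suffix.toList.findIdx (· ∈ sepChars) = suffix.toList.length := by
        have := List.findIdx_le_length (p := (· ∈ sepChars)) (xs := suffix.toList)
        omega
      rw [this, List.drop_length]

-- ===== VERDICT (by name: the statement is the Claim_ definition above) =====
theorem find_common_suffix_smart_py_spec : Claim_equal_find_common_suffix_smart_py := by
  intro strings _
  unfold Spec_find_common_suffix_smart_py
  match strings with
  | [] => rfl
  | [s] => rfl
  | s0 :: s1 :: rest =>
    rw [find_common_suffix_smart_py, if_neg (by simp only [List.length_cons]; omega)]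
    rw [find_common_suffix_smart_py_alt]
    set suffix := find_common_suffix_py (s0 :: s1 :: rest) with hsuffix
    have hchars := suffix_chars_eq s0 s1 rest
    rw [← hsuffix] at hchars
    set G := (s1 :: rest).foldl (fun acc s => cp2go (acc.zip s.toList.reverse))
      s0.toList.reverse with hG
    cases hrev : G.reverse with
    | nil =>
      have hlen0 : PySem.Str.len suffix = 0 := by
        rw [PySem.Str.len_eq, hchars, hrev]
        rfl
      rw [if_pos hlen0]
    | cons c cs =>
      have hsfx : suffix.toList = c :: cs := by rw [hchars, hrev]
      have hlen : PySem.Str.len suffix ≠ 0 := by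
        rw [PySem.Str.len_eq, hsfx]
        simp only [List.length_cons]
        omega
      rw [if_neg hlen]
      by_cases hdot : c = '.'
      · subst hdot
        have hsw : PySem.Str.startswith suffix "." = true := by
          rw [PySem.Str.startswith_eq]
          apply (PySem.Chars.startswith_iff _ _).mpr
          rw [hsfx, show ("." : String).toList = ['.'] from rfl]
          exact (List.cons_prefix_cons).mpr ⟨rfl, List.nil_prefix⟩
        rw [if_pos hsw]
        simp
      · have hsw : ¬ PySem.Str.startswith suffix "." = true := by
          rw [PySem.Str.startswith_eq]
          intro hcon
          have hpre := (PySem.Chars.startswith_iff _ _).mp hcon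
          rw [hsfx, show ("." : String).toList = ['.'] from rfl] at hpre
          exact hdot ((List.cons_prefix_cons).mp hpre).1.symm
        rw [if_neg hsw]
        have hget : PySem.Str.pyGet? suffix 0 = some c := by
          have := PySem.Str.pyGet?_natCast suffix 0
          rw [show ((0 : Nat) : Int) = (0 : Int) from rfl] at this
          rw [this, hsfx]
          rfl
        rw [hget]
        simp only [if_neg hdot]
        exact post_eq c cs suffix hsfx
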